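-- pv_equiv track=rewrite | github.com/ksb8320/Algorithm | Python/Programmers/Level 2/기능개발.py | solution
-- ===== SOURCE A (Python) =====
-- def solution(progresses, speeds):
--     answer = []
--     day,time=[0]*(len(progresses)),[0]*101
--     for i in range(len(progresses)):
--         key=progresses[i]
--         while key<100:
--             key+=speeds[i]
--             day[i]+=1
--     for i in range(1,len(day)):
--         if day[i]<day[i-1]:
--             day[i]=day[i-1]
--     for i in range(len(day)):
--         time[day[i]]+=1
--     for i in range(len(time)):
--         if time[i]!=0:
--             answer.append(time[i])
--
--     return answer
-- ===== SOURCE B (Python) =====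
-- def solution(progresses, speeds):
--     # completion day per feature: ceil((100 - p) / s), 0 if already done
--     days = [0 if p >= 100 else -((p - 100) // speeds[i]) for i, p in enumerate(progresses)]
--     answer = []
--     if not days:
--         return answer
--     leader, count = days[0], 1
--     for d in days[1:]:
--         if d <= leader:
--             count += 1
--         else:
--             answer.append(count)
--             leader, count = d, 1
--     answer.append(count)
--     return answer
-- ===== Notes on version B (the rewrite author's own statement) =====
-- stated objective: simpler
-- what changed: B replaces A's per-feature while-loop simulation, max-propagation pass, size-101 bucket array and bucket-collection loop with a closed-form ceiling-division completion day plus one single grouping pass over the days.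
import Mathlib
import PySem

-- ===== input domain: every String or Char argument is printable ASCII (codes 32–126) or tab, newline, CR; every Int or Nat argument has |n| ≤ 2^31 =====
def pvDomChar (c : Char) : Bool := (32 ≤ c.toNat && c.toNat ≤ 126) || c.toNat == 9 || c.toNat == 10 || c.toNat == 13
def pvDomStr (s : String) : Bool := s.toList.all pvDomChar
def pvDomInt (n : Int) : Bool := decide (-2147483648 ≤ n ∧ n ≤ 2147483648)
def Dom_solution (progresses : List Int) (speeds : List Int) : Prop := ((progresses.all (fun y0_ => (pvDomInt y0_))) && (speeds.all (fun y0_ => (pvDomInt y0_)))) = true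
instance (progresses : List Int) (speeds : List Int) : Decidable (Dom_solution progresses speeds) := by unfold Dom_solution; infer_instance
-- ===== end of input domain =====

-- B replaces A's while-loop simulation, max-propagation pass and size-101 bucket array with a
-- closed-form ceiling-division completion day plus one grouping pass (objective: simpler).

-- ===== PORT A =====
-- the inner `while key<100: key+=speeds[i]; day[i]+=1` loop (guard 0 < s only makes the
-- definition total; Pre_solution guarantees it on every admitted access)
def loopA (s : Int) (key : Int) : Nat :=
  if h : 0 < s ∧ key < 100 then loopA s (key + s) + 1 else 0
termination_by (100 - key).toNat
decreasing_by omega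

-- first loop: day[i] built from progresses[i], speeds[i]
def dayOfA (progresses : List Int) (speeds : List Int) : List Int :=
  (List.range progresses.length).map (fun i =>
    ((loopA (speeds.getD i 0) (progresses.getD i 0) : Nat) : Int))

-- second loop: day[i] = day[i-1] if day[i] < day[i-1]
def propA : Int → List Int → List Int
  | _, [] => []
  | prev, d :: ds =>
      (if d < prev then prev else d) :: propA (if d < prev then prev else d) ds

def prop2 : List Int → List Int
  | [] => []
  | d :: ds => d :: propA d ds

-- third loop: time[day[i]] += 1 on the size-101 array (set is a no-op out of range; Pre_ keeps it in range)
def timeOfA (day2 : List Int) : List Int :=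
  day2.foldl (fun t d => t.set d.toNat (t.getD d.toNat 0 + 1)) (List.replicate 101 0)

-- fourth loop: collect the non-zero buckets
def collectA (time : List Int) : List Int :=
  (List.range time.length).foldl
    (fun acc i => if time.getD i 0 ≠ 0 then acc ++ [time.getD i 0] else acc) []

def solution (progresses : List Int) (speeds : List Int) : List Int :=
  collectA (timeOfA (prop2 (dayOfA progresses speeds)))

-- ===== PORT B =====
-- days = [0 if p >= 100 else -((p - 100) // speeds[i]) for i, p in enumerate(progresses)]
def dayOfB (progresses : List Int) (speeds : List Int) : List Int :=
  (PySem.List.enumerate progresses).map (fun ip =>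
    if 100 ≤ ip.2 then 0
    else -(PySem.Int.floordiv (ip.2 - 100) ((PySem.List.pyGet? speeds ip.1).getD 0)))

-- the single grouping pass over days[1:]
def groupB : Int → Int → List Int → List Int
  | _, count, [] => [count]
  | leader, count, d :: rest =>
      if d ≤ leader then groupB leader (count + 1) rest else count :: groupB d 1 rest

-- `if not days: return []` / `leader = days[0]` / loop over `days[1:]`
def groupTop : List Int → List Int
  | [] => []
  | d :: rest => groupB d 1 rest

def solution_alt (progresses : List Int) (speeds : List Int) : List Int :=
  groupTop (dayOfB progresses speeds)

-- ===== PRECONDITION & SPEC =====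
-- Pre_ holds exactly where A returns: a feature still in progress needs an existing positive
-- speed (else Python raises IndexError / loops forever) finishing within 100 days (else the
-- size-101 bucket `time[day[i]]` raises IndexError).
def Pre_solution (progresses : List Int) (speeds : List Int) : Prop :=
  ∀ i < progresses.length, progresses.getD i 0 < 100 →
    i < speeds.length ∧ 0 < speeds.getD i 0 ∧
      100 - progresses.getD i 0 ≤ 100 * speeds.getD i 0

instance (progresses : List Int) (speeds : List Int) : Decidable (Pre_solution progresses speeds) := by
  unfold Pre_solution; infer_instance

def pvWitness_solution : List Int × List Int := ([93, 30, 55], [1, 30, 5])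

def Spec_solution (progresses : List Int) (speeds : List Int) (out : List Int) : Prop := out = solution_alt progresses speeds
instance (progresses : List Int) (speeds : List Int) (out : List Int) : Decidable (Spec_solution progresses speeds out) := by unfold Spec_solution; infer_instance

-- ===== CLAIM (what is proved, stated in full; the proofs are below) =====
def Claim_equal_solution : Prop := ∀ (progresses : List Int) (speeds : List Int), Dom_solution progresses speeds → Pre_solution progresses speeds → Spec_solution progresses speeds (solution progresses speeds)

-- ===== LEMMAS AND PROOFS =====

-- run-length encoding (proof-only characterisation shared by both pipelines)
def rlAux : Int → Int → List Int → List Int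
  | _, c, [] => [c]
  | v, c, y :: ys => if y = v then rlAux v (c + 1) ys else c :: rlAux y 1 ys

def runLengths : List Int → List Int
  | [] => []
  | y :: ys => rlAux y 1 ys

lemma loopA_of_ge (s key : Int) (h : ¬ key < 100) : loopA s key = 0 := by
  rw [loopA]; simp [h]

lemma loopA_bracket (s : Int) (hs : 0 < s) :
    ∀ n (key : Int), (100 - key).toNat ≤ n → key < 100 →
      ((loopA s key : Int) - 1) * s < 100 - key ∧ 100 - key ≤ (loopA s key : Int) * s := by
  intro n
  induction n with
  | zero => intro key h hk; omega
  | succ n ih =>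
    intro key h hk
    rw [loopA]
    simp only [hs, hk, and_self, dif_pos]
    by_cases hc : key + s < 100
    · have := ih (key + s) (by omega) hc
      push_cast
      constructor <;> nlinarith [this.1, this.2]
    · have h0 : loopA s (key + s) = 0 := loopA_of_ge s (key + s) hc
      rw [h0]
      push_cast
      constructor <;> nlinarith

lemma loopA_eq_ceil (s key : Int) (hs : 0 < s) (hk : key < 100) :
    (loopA s key : Int) = -(PySem.Int.floordiv (key - 100) s) := by
  have hb := loopA_bracket s hs (100 - key).toNat key le_rfl hk
  have ha : key - 100 = -(100 - key) := by ring
  rw [ha, eq_comm, PySem.Int.neg_floordiv_neg_eq_iff_of_pos hs]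
  exact hb

lemma loopA_le_100 (s key : Int) (hs : 0 < s) (hk : key < 100)
    (hbound : 100 - key ≤ 100 * s) : (loopA s key : Int) ≤ 100 := by
  have hb := loopA_bracket s hs (100 - key).toNat key le_rfl hk
  nlinarith [hb.1]

-- the two day lists coincide under Pre_
lemma day_eq (progresses speeds : List Int) (hp : Pre_solution progresses speeds) :
    dayOfA progresses speeds = dayOfB progresses speeds := by
  apply List.ext_getElem
  · simp [dayOfA, dayOfB, PySem.List.length_enumerate]
  · intro i h1 h2
    simp only [dayOfA, dayOfB, List.getElem_map, List.getElem_range,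
      PySem.List.getElem_enumerate, zero_add]
    have hi : i < progresses.length := by
      simpa [dayOfA] using h1
    rw [List.getD_eq_getElem progresses 0 hi]
    by_cases hlt : progresses[i] < 100
    · obtain ⟨hsp, hpos, _⟩ := hp i hi (by rwa [List.getD_eq_getElem progresses 0 hi])
      rw [List.getD_eq_getElem speeds 0 hsp] at hpos ⊢
      rw [if_neg (by omega), loopA_eq_ceil _ _ hpos hlt]
      simp [PySem.List.pyGet?_natCast, List.getElem?_eq_getElem hsp]
    · rw [loopA_of_ge _ _ hlt, if_pos (by omega)]
      simp

lemma day_bounds (progresses speeds : List Int) (hp : Pre_solution progresses speeds) :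
    ∀ x ∈ dayOfA progresses speeds, 0 ≤ x ∧ x ≤ 100 := by
  intro x hx
  simp only [dayOfA, List.mem_map, List.mem_range] at hx
  obtain ⟨i, hi, rfl⟩ := hx
  refine ⟨Int.natCast_nonneg _, ?_⟩
  by_cases hlt : progresses.getD i 0 < 100
  · obtain ⟨_, hpos, hb⟩ := hp i hi hlt
    exact loopA_le_100 _ _ hpos hlt hb
  · rw [loopA_of_ge _ _ hlt]; norm_num

lemma propA_le (ds : List Int) : ∀ m x, x ∈ propA m ds → m ≤ x := by
  induction ds with
  | nil => simp [propA]
  | cons d ds ih =>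
    intro m x hx
    simp only [propA, List.mem_cons] at hx
    rcases hx with h | h
    · subst h; split <;> omega
    · have := ih _ _ h
      split at this <;> omega

lemma propA_sorted (ds : List Int) : ∀ m, (propA m ds).Pairwise (· ≤ ·) := by
  induction ds with
  | nil => simp [propA]
  | cons d ds ih =>
    intro m
    simp only [propA]
    exact List.pairwise_cons.mpr ⟨fun x hx => propA_le ds _ x hx, ih _⟩

lemma propA_upper (ds : List Int) : ∀ m hi, m ≤ hi → (∀ x ∈ ds, x ≤ hi) →
    ∀ x ∈ propA m ds, x ≤ hi := by
  induction ds with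
  | nil => simp [propA]
  | cons d ds ih =>
    intro m hi hm hd x hx
    simp only [propA, List.mem_cons] at hx
    have hdle : d ≤ hi := hd d (by simp)
    rcases hx with h | h
    · subst h; split <;> omega
    · exact ih _ hi (by split <;> omega) (fun y hy => hd y (by simp [hy])) x h

lemma prop2_sorted (ds : List Int) : (prop2 ds).Pairwise (· ≤ ·) := by
  cases ds with
  | nil => simp [prop2]
  | cons d rest =>
    simp only [prop2]
    exact List.pairwise_cons.mpr ⟨fun x hx => propA_le rest d x hx, propA_sorted rest d⟩

lemma prop2_bounds (ds : List Int) (hb : ∀ x ∈ ds, 0 ≤ x ∧ x ≤ 100) :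
    ∀ x ∈ prop2 ds, 0 ≤ x ∧ x < 101 := by
  cases ds with
  | nil => simp [prop2]
  | cons d rest =>
    intro x hx
    simp only [prop2, List.mem_cons] at hx
    have hd := hb d (by simp)
    rcases hx with h | h
    · omega
    · have h1 := propA_le rest d x h
      have h2 := propA_upper rest d 100 (by omega)
        (fun y hy => (hb y (by simp [hy])).2) x h
      omega

lemma groupB_eq_rl (rest : List Int) : ∀ leader c,
    groupB leader c rest = rlAux leader c (propA leader rest) := by
  induction rest with
  | nil => intro leader c; simp [groupB, propA, rlAux]
  | cons d rest ih =>
    intro leader c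
    simp only [groupB, propA]
    by_cases h : d ≤ leader
    · have hm : (if d < leader then leader else d) = leader := by
        split <;> omega
      rw [hm, if_pos h]
      have : rlAux leader c (leader :: propA leader rest) =
          rlAux leader (c + 1) (propA leader rest) := by
        simp [rlAux]
      rw [this, ih leader (c + 1)]
    · have hm : (if d < leader then leader else d) = d := by
        split <;> omega
      rw [hm, if_neg h]
      have : rlAux leader c (d :: propA d rest) =
          c :: rlAux d 1 (propA d rest) := by
        simp only [rlAux]
        rw [if_neg (by omega)]
      rw [this, ih d 1]

lemma rlAux_replicate (v : Int) : ∀ (j : Nat) (c : Int),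
    rlAux v c (List.replicate j v) = [c + j] := by
  intro j
  induction j with
  | zero => intro c; simp [rlAux]
  | succ j ih =>
    intro c
    rw [List.replicate_succ]
    have h1 : rlAux v c (v :: List.replicate j v) =
        rlAux v (c + 1) (List.replicate j v) := by simp [rlAux]
    rw [h1, ih]
    have : c + 1 + (j : Int) = c + ((j : Int) + 1) := by ring
    rw [this]
    push_cast
    ring_nf

lemma rlAux_append_rep (v : Int) (k : Nat) (hk : 1 ≤ k) :
    ∀ (xs : List Int) (v0 c : Int), v0 ≠ v → (∀ x ∈ xs, x ≠ v) →
      rlAux v0 c (xs ++ List.replicate k v) = rlAux v0 c xs ++ [(k : Int)] := by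
  intro xs
  induction xs with
  | nil =>
    intro v0 c hv0 _
    obtain ⟨k', rfl⟩ : ∃ k', k = k' + 1 := ⟨k - 1, by omega⟩
    rw [List.nil_append, List.replicate_succ]
    have h1 : rlAux v0 c (v :: List.replicate k' v) =
        c :: rlAux v 1 (List.replicate k' v) := by
      simp only [rlAux]
      rw [if_neg (fun h => hv0 (Eq.symm h))]
    rw [h1, rlAux_replicate]
    have : (1 : Int) + (k' : Int) = ((k' + 1 : Nat) : Int) := by push_cast; ring
    rw [this]
    rfl
  | cons x xs ih =>
    intro v0 c hv0 hxs
    have hx : x ≠ v := hxs x (by simp)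
    rw [List.cons_append]
    by_cases h : x = v0
    · have h1 : rlAux v0 c (x :: (xs ++ List.replicate k v)) =
          rlAux v0 (c + 1) (xs ++ List.replicate k v) := by
        simp [rlAux, h]
      have h2 : rlAux v0 c (x :: xs) = rlAux v0 (c + 1) xs := by
        simp [rlAux, h]
      rw [h1, h2, ih v0 (c + 1) hv0 (fun y hy => hxs y (by simp [hy]))]
    · have h1 : rlAux v0 c (x :: (xs ++ List.replicate k v)) =
          c :: rlAux x 1 (xs ++ List.replicate k v) := by
        simp [rlAux, h]
      have h2 : rlAux v0 c (x :: xs) = c :: rlAux x 1 xs := by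
        simp [rlAux, h]
      rw [h1, h2, ih x 1 hx (fun y hy => hxs y (by simp [hy])), List.cons_append]

lemma runLengths_append_rep (xs : List Int) (v : Int) (k : Nat) (hk : 1 ≤ k)
    (hxs : ∀ x ∈ xs, x ≠ v) :
    runLengths (xs ++ List.replicate k v) = runLengths xs ++ [(k : Int)] := by
  cases xs with
  | nil =>
    obtain ⟨k', rfl⟩ : ∃ k', k = k' + 1 := ⟨k - 1, by omega⟩
    rw [List.nil_append, List.replicate_succ]
    show rlAux v 1 (List.replicate k' v) = [] ++ [((k' + 1 : Nat) : Int)]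
    rw [rlAux_replicate]
    have : (1 : Int) + (k' : Int) = ((k' + 1 : Nat) : Int) := by push_cast; ring
    rw [this]
    rfl
  | cons h t =>
    show rlAux h 1 (t ++ List.replicate k v) = rlAux h 1 t ++ [(k : Int)]
    exact rlAux_append_rep v k hk t h 1 (hxs h (by simp)) (fun y hy => hxs y (by simp [hy]))

-- the elements of a sorted list below n+1 are those below n followed by the copies of n
lemma filter_ge_replicate (n : Int) : ∀ (ys : List Int), ys.Pairwise (· ≤ ·) →
    (∀ y ∈ ys, n ≤ y) →
    ys.filter (fun y => decide (y < n + 1)) = List.replicate (ys.count n) n := by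
  intro ys
  induction ys with
  | nil => simp
  | cons z zs ih =>
    intro hp hge
    obtain ⟨h1, h2⟩ := List.pairwise_cons.mp hp
    by_cases hz : z = n
    · subst hz
      rw [List.filter_cons_of_pos (by simp only [decide_eq_true_eq]; omega), List.count_cons_self,
        List.replicate_succ]
      rw [ih h2 (fun y hy => hge y (by simp [hy]))]
    · have hzgt : n < z := lt_of_le_of_ne (hge z (by simp)) (fun h => hz h.symm)
      rw [List.filter_cons_of_neg (by simp only [decide_eq_true_eq]; omega)]
      rw [List.count_cons_of_ne (fun h => hz (by omega)) ]
      exact ih h2 (fun y hy => hge y (by simp [hy]))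

lemma filter_split (n : Int) : ∀ (ys : List Int), ys.Pairwise (· ≤ ·) →
    ys.filter (fun y => decide (y < n + 1)) =
      ys.filter (fun y => decide (y < n)) ++ List.replicate (ys.count n) n := by
  intro ys
  induction ys with
  | nil => simp
  | cons z zs ih =>
    intro hp
    obtain ⟨h1, h2⟩ := List.pairwise_cons.mp hp
    rcases lt_trichotomy z n with hz | hz | hz
    · rw [List.filter_cons_of_pos (by simp only [decide_eq_true_eq]; omega), List.filter_cons_of_pos (by simp only [decide_eq_true_eq]; omega),
        List.count_cons_of_ne (by omega), List.cons_append, ih h2]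
    · subst hz
      rw [List.filter_cons_of_pos (by simp only [decide_eq_true_eq]; omega), List.filter_cons_of_neg (by simp),
        List.count_cons_self, List.replicate_succ]
      have hnil : zs.filter (fun y => decide (y < z)) = [] := by
        rw [List.filter_eq_nil_iff]
        intro y hy
        have := h1 y hy
        simp; omega
      rw [hnil, List.nil_append]
      exact congrArg (z :: ·) (filter_ge_replicate z zs h2 h1)
    · have hnone : ∀ y ∈ z :: zs, ¬ y < n + 1 := by
        intro y hy
        rcases List.mem_cons.mp hy with rfl | hy'
        · omega
        · have := h1 y hy'; omega
      have hnone' : ∀ y ∈ z :: zs, ¬ y < n := fun y hy => by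
        have := hnone y hy; omega
      rw [List.filter_eq_nil_iff.mpr (by intro y hy; simpa using hnone y hy),
        List.filter_eq_nil_iff.mpr (by intro y hy; simpa using hnone' y hy),
        List.count_eq_zero.mpr (by intro hmem; exact hnone n hmem (by omega))]
      rfl

-- histogram: bucket i of timeOfA holds the count of i
lemma foldl_inc_length (ys : List Int) : ∀ t : List Int,
    (ys.foldl (fun t d => t.set d.toNat (t.getD d.toNat 0 + 1)) t).length = t.length := by
  induction ys with
  | nil => simp
  | cons y ys ih => intro t; rw [List.foldl_cons, ih]; simp

lemma time_length (ys : List Int) : (timeOfA ys).length = 101 := by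
  rw [timeOfA, foldl_inc_length]; simp

lemma foldl_inc_getD (ys : List Int) : ∀ (t : List Int), t.length = 101 →
    (∀ y ∈ ys, 0 ≤ y ∧ y < 101) → ∀ i : Nat, i < 101 →
    (ys.foldl (fun t d => t.set d.toNat (t.getD d.toNat 0 + 1)) t).getD i 0 =
      t.getD i 0 + (ys.count (i : Int) : Int) := by
  induction ys with
  | nil => intro t _ _ i _; simp
  | cons y ys ih =>
    intro t hlen hb i hi
    have hy := hb y (by simp)
    rw [List.foldl_cons,
      ih _ (by rw [List.length_set]; exact hlen) (fun z hz => hb z (by simp [hz])) i hi]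
    have hset : (t.set y.toNat (t.getD y.toNat 0 + 1)).getD i 0 =
        if y = (i : Int) then t.getD i 0 + 1 else t.getD i 0 := by
      by_cases hyi : y = (i : Int)
      · have : y.toNat = i := by omega
        rw [if_pos hyi, this]
        simp only [List.getD]
        rw [List.getElem?_set_self (by omega), List.getElem?_eq_getElem (by omega)]
        simp
      · have hne : y.toNat ≠ i := by omega
        rw [if_neg hyi]
        simp only [List.getD]
        rw [List.getElem?_set_ne hne]
    rw [hset, List.count_cons]
    by_cases hyi : y = (i : Int)
    · simp [hyi]
      ring
    · simp [hyi]

lemma time_getD (ys : List Int) (hb : ∀ y ∈ ys, 0 ≤ y ∧ y < 101) :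
    ∀ i : Nat, i < 101 → (timeOfA ys).getD i 0 = (ys.count (i : Int) : Int) := by
  intro i hi
  rw [timeOfA, foldl_inc_getD ys _ (by simp) hb i hi]
  rw [List.getD_replicate _ hi, zero_add]

-- collecting the non-zero counts in increasing value order = run lengths of a sorted list
lemma collect_runs (ys : List Int) (hs : ys.Pairwise (· ≤ ·)) (h0 : ∀ y ∈ ys, 0 ≤ y) :
    ∀ n : Nat,
      (List.range n).foldl
        (fun (acc : List Int) (i : Nat) => if ((ys.count (i : Int) : Int)) ≠ 0 then
            acc ++ [((ys.count (i : Int) : Int))] else acc) []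
      = runLengths (ys.filter (fun y => decide (y < (n : Int)))) := by
  intro n
  induction n with
  | zero =>
    rw [List.range_zero, List.foldl_nil,
      List.filter_eq_nil_iff.mpr (by intro y hy; have := h0 y hy; simp; omega)]
    rfl
  | succ n ih =>
    rw [List.range_succ, List.foldl_append, ih, List.foldl_cons, List.foldl_nil]
    have hcast : ((n + 1 : Nat) : Int) = (n : Int) + 1 := by push_cast; ring
    by_cases hc : ys.count ((n : Nat) : Int) = 0
    · have hz : ((ys.count ((n : Nat) : Int) : Int)) = 0 := by exact_mod_cast hc
      rw [if_neg (by simp [hz])]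
      have hnmem : ((n : Nat) : Int) ∉ ys := List.count_eq_zero.mp hc
      congr 1
      rw [hcast]
      apply List.filter_congr
      intro y hy
      have hyn : y ≠ ((n : Nat) : Int) := fun h => hnmem (h ▸ hy)
      simp only [decide_eq_decide]
      omega
    · rw [if_pos (by exact_mod_cast hc)]
      rw [hcast, filter_split (n : Int) ys hs]
      rw [runLengths_append_rep _ _ _ (by omega)
        (fun x hx => by
          have := List.of_mem_filter hx
          simp at this
          omega)]

-- the whole A pipeline on a day list with entries in [0, 100] is B's grouping pass
lemma pipeline (ds : List Int) (hb : ∀ x ∈ ds, 0 ≤ x ∧ x ≤ 100) :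
    collectA (timeOfA (prop2 ds)) = groupTop ds := by
  have hbnd := prop2_bounds ds hb
  have hsort := prop2_sorted ds
  have step : collectA (timeOfA (prop2 ds)) = runLengths (prop2 ds) := by
    rw [collectA, time_length]
    have hcg := PySem.List.foldl_congr_mem
      (l := List.range 101) (init := ([] : List Int))
      (f := fun (acc : List Int) (i : Nat) =>
        if (timeOfA (prop2 ds)).getD i 0 ≠ 0 then
          acc ++ [(timeOfA (prop2 ds)).getD i 0] else acc)
      (g := fun (acc : List Int) (i : Nat) =>
        if (((prop2 ds).count (i : Int) : Int)) ≠ 0 then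
          acc ++ [(((prop2 ds).count (i : Int) : Int))] else acc)
      (by
        intro acc i hi
        simp only [time_getD _ hbnd i (List.mem_range.mp hi)])
    rw [hcg, collect_runs _ hsort (fun y hy => (hbnd y hy).1) 101]
    congr 1
    apply List.filter_eq_self.mpr
    intro y hy
    have := hbnd y hy
    simp
    omega
  rw [step]
  cases ds with
  | nil => rfl
  | cons d rest =>
    show rlAux d 1 (propA d rest) = groupB d 1 rest
    rw [groupB_eq_rl]

-- ===== VERDICT (by name: the statement is the Claim_ definition above) =====
theorem solution_spec : Claim_equal_solution := by
  intro progresses speeds _ hp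
  unfold Spec_solution solution solution_alt
  rw [← day_eq progresses speeds hp]
  exact pipeline (dayOfA progresses speeds) (day_bounds progresses speeds hp)
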